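-- pv_equiv track=rewrite | github.com/highdefinitionaudiodriver/cobol2java | src/division_parser.py | _process_fixed_format
-- ===== SOURCE A (Python) =====
-- from typing import List, Tuple, Optional
--
-- def _process_fixed_format(raw_lines: List[str]) -> List[str]:
--     """Process as fixed-format COBOL (columns 7-72)."""
--     processed = []
--     for line in raw_lines:
--         line = line.rstrip("\n\r")
--
--         if len(line) >= 7:
--             indicator = line[6] if len(line) > 6 else " "
--             # Comment or debug line
--             if indicator in ("*", "/", "D", "d"):
--                 continue
--             # Continuation line
--             if indicator == "-":
--                 if processed:
--                     cont = line[7:72].strip() if len(line) > 7 else ""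
--                     processed[-1] = processed[-1].rstrip() + " " + cont
--                 continue
--             content = line[6:72] if len(line) > 6 else ""
--         else:
--             content = line
--
--         content = content.rstrip()
--         if content.strip():
--             processed.append(content.strip())
--
--     return processed
-- ===== SOURCE B (Python) =====
-- from typing import List, Optional, Tuple
--
--
-- def _token(raw: str) -> Optional[Tuple[bool, str]]:
--     """One raw line -> None (comment/debug/blank), (True, s) continuation
--     text, or (False, s) non-empty stripped content."""
--     line = raw.rstrip("\n\r")
--     if len(line) >= 7:
--         ind = line[6]
--         if ind in "*/Dd":
--             return None
--         if ind == "-":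
--             return (True, line[7:72].strip())
--         text = line[6:72].strip()
--     else:
--         text = line.strip()
--     return (False, text) if text else None
--
--
-- def _groups(toks: List[Tuple[bool, str]]) -> List[List[str]]:
--     """Split the token stream into runs: each content token together with
--     its trailing continuations (continuations with no content before them
--     are dropped)."""
--     groups: List[List[str]] = []
--     n = len(toks)
--     i = 0
--     while i < n:
--         if toks[i][0]:          # continuation with nothing to attach to
--             i += 1
--             continue
--         j = i + 1
--         while j < n and toks[j][0]:
--             j += 1
--         groups.append([t for _, t in toks[i:j]])
--         i = j
--     return groups
--
--
-- def _join(parts: List[str]) -> str: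
--     entry = parts[0]
--     for cont in parts[1:]:
--         entry = entry.rstrip() + " " + cont
--     return entry
--
--
-- def _process_fixed_format(raw_lines: List[str]) -> List[str]:
--     """Process as fixed-format COBOL (columns 7-72): tokenize, group runs,
--     join each group."""
--     toks = [t for t in map(_token, raw_lines) if t is not None]
--     return [_join(g) for g in _groups(toks)]
-- ===== Notes on version B (the rewrite author's own statement) =====
-- stated objective: alternative
-- what changed: B replaces A's single pass that mutates result[-1] by a three-stage pipeline: tokenize each line (dropping comments and blanks), split the token stream into runs of one content token plus its trailing continuations, then build the output as a map that joins each run independently.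
import Mathlib
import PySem

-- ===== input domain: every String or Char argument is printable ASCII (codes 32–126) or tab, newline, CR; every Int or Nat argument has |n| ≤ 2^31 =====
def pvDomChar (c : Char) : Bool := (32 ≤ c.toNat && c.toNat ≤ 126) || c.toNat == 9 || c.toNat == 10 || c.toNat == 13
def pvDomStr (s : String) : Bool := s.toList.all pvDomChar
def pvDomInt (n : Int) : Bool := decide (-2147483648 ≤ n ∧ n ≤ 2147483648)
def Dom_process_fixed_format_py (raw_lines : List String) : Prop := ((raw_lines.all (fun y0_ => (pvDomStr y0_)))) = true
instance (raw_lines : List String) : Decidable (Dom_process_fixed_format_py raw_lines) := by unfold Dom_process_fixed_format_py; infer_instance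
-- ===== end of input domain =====

-- B replaces A's single pass mutating result[-1] by tokenize → split into runs → join each run (same cost, different algorithm shape).

-- shared primitive: Python's str.rstrip("\n\r") — drop trailing '\n'/'\r' characters (exact, hand-ported: PySem has no per-charset rstrip)
def pvRstripNL (cs : List Char) : List Char :=
  (cs.reverse.dropWhile (fun c => c == '\n' || c == '\r')).reverse

-- ===== PORT A =====
-- shared tail of A's loop body: content = content.rstrip(); if content.strip(): processed.append(content.strip())
def pvFinishA (processed : List (List Char)) (content : List Char) : List (List Char) :=
  let content := PySem.Chars.rstrip content
  if PySem.Chars.strip content ≠ [] then processed ++ [PySem.Chars.strip content] else processed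

def pvStepA (processed : List (List Char)) (raw : String) : List (List Char) :=
  let line := pvRstripNL raw.toList
  if 7 ≤ line.length then
    let indicator := if 6 < line.length then (PySem.List.pyGet? line 6).getD ' ' else ' '
    if indicator = '*' ∨ indicator = '/' ∨ indicator = 'D' ∨ indicator = 'd' then processed
    else if indicator = '-' then
      (if processed ≠ [] then
        let cont := if 7 < line.length then PySem.Chars.strip (PySem.List.slice line (some 7) (some 72)) else []
        processed.dropLast ++ [PySem.Chars.rstrip processed.getLast! ++ (' ' :: cont)]
      else processed)
    else
      pvFinishA processed (if 6 < line.length then PySem.List.slice line (some 6) (some 72) else [])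
  else
    pvFinishA processed line

def process_fixed_format_py (raw_lines : List String) : List String :=
  (raw_lines.foldl pvStepA []).map String.ofList

-- ===== PORT B =====
-- stage 1: one raw line -> none (comment/debug/blank), (true, s) continuation text, (false, s) non-empty stripped content
def pvToken (raw : String) : Option (Bool × List Char) :=
  let line := pvRstripNL raw.toList
  if 7 ≤ line.length then
    let ind := (PySem.List.pyGet? line 6).getD ' '
    if ind = '*' ∨ ind = '/' ∨ ind = 'D' ∨ ind = 'd' then none
    else if ind = '-' then some (true, PySem.Chars.strip (PySem.List.slice line (some 7) (some 72)))
    else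
      let text := PySem.Chars.strip (PySem.List.slice line (some 6) (some 72))
      if text ≠ [] then some (false, text) else none
  else
    let text := PySem.Chars.strip line
    if text ≠ [] then some (false, text) else none

-- stage 2: split the token stream into runs: a content token plus its trailing continuations;
-- leading continuations (nothing to attach to) are dropped (Source B's index loop, as structural recursion)
def pvGroups : List (Bool × List Char) → List (List (List Char))
  | [] => []
  | (true, _) :: rest => pvGroups rest
  | (false, t) :: rest =>
      (t :: (rest.takeWhile (fun p => p.1)).map (fun p => p.2)) ::
        pvGroups (rest.dropWhile (fun p => p.1))
termination_by toks => toks.length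
decreasing_by
  · simp
  · have := List.length_dropWhile_le (fun p => p.1) rest
    simp; omega

-- stage 3: join one run
def pvJoin : List (List Char) → List Char
  | [] => []
  | h :: t => t.foldl (fun e c => PySem.Chars.rstrip e ++ (' ' :: c)) h

def process_fixed_format_py_alt (raw_lines : List String) : List String :=
  ((pvGroups (raw_lines.filterMap pvToken)).map pvJoin).map String.ofList

-- ===== PRECONDITION & SPEC =====
def Spec_process_fixed_format_py (raw_lines : List String) (out : List String) : Prop := out = process_fixed_format_py_alt raw_lines
instance (raw_lines : List String) (out : List String) : Decidable (Spec_process_fixed_format_py raw_lines out) := by unfold Spec_process_fixed_format_py; infer_instance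

-- ===== CLAIM (what is proved, stated in full; the proofs are below) =====
def Claim_equal_process_fixed_format_py : Prop := ∀ (raw_lines : List String), Dom_process_fixed_format_py raw_lines → Spec_process_fixed_format_py raw_lines (process_fixed_format_py raw_lines)

-- ===== LEMMAS AND PROOFS =====

-- the effect of one token on A's accumulator
def pvApply (acc : List (List Char)) (tok : Bool × List Char) : List (List Char) :=
  match tok with
  | (true, t) =>
      if acc = [] then acc
      else acc.dropLast ++ [PySem.Chars.rstrip acc.getLast! ++ (' ' :: t)]
  | (false, t) => acc ++ [t]

-- lift to the optional token a line produces
def pvApplyOpt (acc : List (List Char)) (tok : Option (Bool × List Char)) : List (List Char) :=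
  match tok with
  | none => acc
  | some t => pvApply acc t

-- dropWhile is idempotent
theorem pv_dropWhile_idem {α : Type} (p : α → Bool) (l : List α) :
    List.dropWhile p (List.dropWhile p l) = List.dropWhile p l := by
  induction l with
  | nil => rfl
  | cons a t ih =>
    by_cases h : p a = true
    · simp [h, ih]
    · simp [h]

-- left-trim and right-trim commute
theorem pv_trim_comm {α : Type} (p : α → Bool) (cs : List α) :
    List.dropWhile p (List.dropWhile p cs.reverse).reverse =
      (List.dropWhile p (List.dropWhile p cs).reverse).reverse := by
  induction cs with
  | nil => rfl
  | cons c cs' ih =>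
    rw [List.reverse_cons, List.dropWhile_append]
    by_cases he : (List.dropWhile p cs'.reverse).isEmpty = true
    · have h2 : List.dropWhile p cs' = [] := List.dropWhile_eq_nil_iff.mpr
        (fun x hx => (List.dropWhile_eq_nil_iff.mp (List.isEmpty_iff.mp he)) x
          (List.mem_reverse.mpr hx))
      by_cases hpc : p c = true
      · simp [he, hpc, h2]
      · simp [he, hpc, List.dropWhile_append]
    · rw [if_neg he, List.reverse_append]
      by_cases hpc : p c = true
      · simpa [List.dropWhile_cons, hpc] using ih
      · simp [hpc, List.dropWhile_append, he]

-- strip ∘ rstrip = strip (both sides use .strip(); A additionally rstrips first)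
theorem pv_strip_rstrip (cs : List Char) :
    PySem.Chars.strip (PySem.Chars.rstrip cs) = PySem.Chars.strip cs := by
  unfold PySem.Chars.strip PySem.Chars.rstrip PySem.Chars.lstrip
  rw [pv_trim_comm PySem.Chars.isspace cs]
  simp [pv_dropWhile_idem]

-- one loop iteration of A = applying B's token for that line
theorem pv_step_eq (acc : List (List Char)) (raw : String) :
    pvStepA acc raw = pvApplyOpt acc (pvToken raw) := by
  unfold pvStepA pvToken pvFinishA pvApplyOpt
  set line := pvRstripNL raw.toList with hline
  by_cases h7 : 7 ≤ line.length
  · have h6 : 6 < line.length := by omega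
    simp only [if_pos h7, if_pos h6]
    set ind := (PySem.List.pyGet? line 6).getD ' ' with hind
    by_cases hstar : ind = '*' ∨ ind = '/' ∨ ind = 'D' ∨ ind = 'd'
    · simp [hstar]
    · simp only [if_neg hstar]
      by_cases hdash : ind = '-'
      · simp only [if_pos hdash, pvApply]
        by_cases hacc : acc = []
        · simp [hacc]
        · simp only [ne_eq, hacc, not_false_eq_true, if_true]
          by_cases h8 : 7 < line.length
          · simp [h8]
          · have hlen : line.length = 7 := by omega
            have : PySem.List.slice line (some 7) (some 72) = [] := by
              rw [PySem.List.slice_toNat line (by norm_num) (by norm_num)]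
              simp [List.drop_eq_nil_iff, hlen]
            simp [h8, this, PySem.Chars.strip, PySem.Chars.rstrip, PySem.Chars.lstrip]
      · simp only [if_neg hdash, pvApply, pv_strip_rstrip]
        by_cases hz : PySem.Chars.strip (PySem.List.slice line (some 6) (some 72)) = []
        · simp [hz]
        · simp [hz]
  · have hlt : ¬ 7 ≤ line.length := h7
    simp only [if_neg hlt, pvApply, pv_strip_rstrip]
    by_cases hz : PySem.Chars.strip line = []
    · simp [hz]
    · simp [hz]

-- fold over raw lines = fold of pvApply over the token stream
theorem pv_fold_tokens (raws : List String) (acc : List (List Char)) :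
    raws.foldl pvStepA acc = (raws.filterMap pvToken).foldl pvApply acc := by
  induction raws generalizing acc with
  | nil => rfl
  | cons r rs ih =>
    rw [List.foldl_cons, pv_step_eq, List.filterMap_cons]
    cases h : pvToken r with
    | none => simp [pvApplyOpt, ih]
    | some t => simp [pvApplyOpt, ih]

-- merging touches only the last entry: a nonempty prefix splits off
theorem pv_apply_split (toks : List (Bool × List Char)) (acc0 : List (List Char)) (e : List Char) :
    toks.foldl pvApply (acc0 ++ [e]) = acc0 ++ toks.foldl pvApply [e] := by
  induction toks generalizing acc0 e with
  | nil => rfl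
  | cons t r ih =>
    obtain ⟨b, s⟩ := t
    cases b with
    | true =>
      have h1 : pvApply (acc0 ++ [e]) (true, s) =
          acc0 ++ [PySem.Chars.rstrip e ++ (' ' :: s)] := by
        simp [pvApply]
      have h2 : pvApply [e] (true, s) = [PySem.Chars.rstrip e ++ (' ' :: s)] := by
        simp [pvApply]
      simp only [List.foldl_cons, h1, h2, ih]
    | false =>
      have h1 : pvApply (acc0 ++ [e]) (false, s) = (acc0 ++ [e]) ++ [s] := by
        simp [pvApply]
      have h2 : pvApply [e] (false, s) = [e] ++ [s] := by simp [pvApply]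
      simp only [List.foldl_cons, h1, h2]
      rw [ih (acc0 ++ [e]) s, ih [e] s]
      simp

-- a singleton accumulator folds to: the joined current run, then the joined remaining groups
theorem pv_single_run (toks : List (Bool × List Char)) (e : List Char) :
    toks.foldl pvApply [e] =
      pvJoin (e :: (toks.takeWhile (fun p => p.1)).map (fun p => p.2)) ::
        (pvGroups (toks.dropWhile (fun p => p.1))).map pvJoin := by
  induction toks generalizing e with
  | nil => simp [pvJoin, pvGroups]
  | cons t r ih =>
    obtain ⟨b, s⟩ := t
    cases b with
    | true =>
      have h2 : pvApply [e] (true, s) = [PySem.Chars.rstrip e ++ (' ' :: s)] := by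
        simp [pvApply]
      rw [List.foldl_cons, h2, ih]
      simp [pvJoin]
    | false =>
      have h2 : pvApply [e] (false, s) = [e] ++ [s] := by simp [pvApply]
      rw [List.foldl_cons, h2, pv_apply_split, ih]
      simp [pvJoin, pvGroups]

-- empty accumulator folds to the joined groups
theorem pv_empty_run (toks : List (Bool × List Char)) :
    toks.foldl pvApply [] = (pvGroups toks).map pvJoin := by
  induction toks with
  | nil => simp [pvGroups]
  | cons t r ih =>
    obtain ⟨b, s⟩ := t
    cases b with
    | true =>
      have h : pvApply [] (true, s) = [] := by simp [pvApply]
      rw [List.foldl_cons, h, ih]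
      simp [pvGroups]
    | false =>
      have h : pvApply [] (false, s) = [s] := by simp [pvApply]
      rw [List.foldl_cons, h, pv_single_run]
      simp [pvGroups]

-- ===== VERDICT (by name: the statement is the Claim_ definition above) =====
theorem process_fixed_format_py_spec : Claim_equal_process_fixed_format_py := by
  intro raw_lines _
  unfold Spec_process_fixed_format_py process_fixed_format_py process_fixed_format_py_alt
  rw [pv_fold_tokens, pv_empty_run]
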